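-- pv_equiv track=rewrite | github.com/Polipaul13/for_resume | venv/scheme/FPGA/Read_data.py | Get_mems_MUX_method_LUT3
-- ===== SOURCE A (Python) =====
-- def Get_mems_MUX_method_LUT3(data, x):
--     data = int(data,16)
--     bind = bin(data)[2:]
--     while len(bind) < 8:
--         bind = '0'+bind
--     i = 0
--     result = ''
--     while i < len(bind):
--         if (bind[i] == '1'):
--             result = result + 'VCC ' + 'lutmem' + str(x) + '_'+str(i)+'\n'
--         else:
--             result = result + 'GND ' + 'lutmem' + str(x) + '_'+str(i)+'\n'
--         i+=1
--     return result #ALL VCC/GND lutmemx_x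
-- ===== SOURCE B (Python) =====
-- def Get_mems_MUX_method_LUT3(data, x):
--     v = int(data, 16)
--     n = max(8, v.bit_length())
--     # collect the VCC/GND tags LSB-first by repeated halving (no binary string, no padding loop)
--     tags = []
--     for _ in range(n):
--         tags.append('VCC ' if v & 1 else 'GND ')
--         v >>= 1
--     # emit MSB-first by walking the tag list back-to-front
--     return ''.join(tag + 'lutmem' + str(x) + '_' + str(i) + '\n'
--                    for i, tag in enumerate(reversed(tags)))
-- ===== Notes on version B (the rewrite author's own statement) =====
-- stated objective: faster
-- what changed: B never builds A's bin()-string, never runs the zero-pad loop and never indexes characters: it collects the per-bit VCC/GND tags into a list LSB-first by repeated halving (v & 1, v >>= 1), then emits the lines by walking that tag list back-to-front with enumerate(reversed(tags)) and a single ''.join instead of A's quadratic repeated string concatenation.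
-- intended difference: On hex strings denoting a negative number A drops the sign and prints the 'b' of bin()'s '-0b' prefix as a GND line (an artefact of slicing bin(v)[2:]), while B prints the max(8,bit_length)-bit two's-complement VCC/GND lines, the intended per-bit reading of the value. — e.g. on Get_mems_MUX_method_LUT3("-5", 0): A returns "GND lutmem0_0\nGND lutmem0_1\nGND lutmem0_2\nGND lutmem0_3\nGND lutmem0_4\nVCC lutmem0_5\nGND lutmem0_6\nVCC lutmem0_7…, B returns "VCC lutmem0_0\nVCC lutmem0_1\nVCC lutmem0_2\nVCC lutmem0_3\nVCC lutmem0_4\nGND lutmem0_5\nVCC lutmem0_6\nVCC lutmem0_7…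
import Mathlib
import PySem

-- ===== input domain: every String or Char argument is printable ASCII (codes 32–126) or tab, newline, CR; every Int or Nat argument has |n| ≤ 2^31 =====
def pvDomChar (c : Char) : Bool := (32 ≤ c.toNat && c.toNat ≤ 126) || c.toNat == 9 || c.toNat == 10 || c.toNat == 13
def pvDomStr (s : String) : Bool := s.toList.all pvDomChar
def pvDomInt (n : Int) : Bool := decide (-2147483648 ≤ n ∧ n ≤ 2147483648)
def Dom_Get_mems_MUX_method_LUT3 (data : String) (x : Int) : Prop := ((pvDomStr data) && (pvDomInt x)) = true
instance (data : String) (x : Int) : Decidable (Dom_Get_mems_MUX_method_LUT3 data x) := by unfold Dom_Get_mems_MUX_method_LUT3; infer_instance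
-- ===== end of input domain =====

-- B never builds A's padded binary string: it collects the VCC/GND tags LSB-first by repeated
-- halving into a list, then emits the lines by walking that list back-to-front with one join;
-- on negative hex inputs B emits the two's-complement bits instead of A's accidental
-- "drop the sign, print bin()'s 'b' as GND" lines (see D_).

-- ===== PORT A =====
-- while len(bind) < 8: bind = '0' + bind   (at most 8 iterations are ever needed, so the loop
-- is written with a fuel of 8; the guard only makes the same computation total)
def padLoop : Nat → List Char → List Char
  | 0, cs => cs
  | k + 1, cs => if cs.length < 8 then padLoop k ('0' :: cs) else cs

def padA (cs : List Char) : List Char := padLoop 8 cs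

def Get_mems_MUX_method_LUT3 (data : String) (x : Int) : String :=
  match PySem.Int.ofStrBase? data 16 with
  | none => ""  -- int(data, 16) raises ValueError: excluded by Pre_
  | some v =>
    -- bind = bin(data)[2:]  (bin(v) as a char list is toBinChars0b v; the slice [2:] is drop 2 — exact)
    let bind := padA (List.drop 2 (PySem.Int.toBinChars0b v))
    -- while i < len(bind): result += ('VCC '/'GND ') + 'lutmem' + str(x) + '_' + str(i) + '\n'
    -- (bind[i] with 0 ≤ i < len(bind) is always in range; pyGetD's default is never used)
    let result := (PySem.List.pyRange 0 (bind.length : Int) 1).foldl (fun res i =>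
      if PySem.List.pyGetD bind i ' ' = '1' then
        res ++ "VCC ".toList ++ "lutmem".toList ++ PySem.Int.toChars x ++ "_".toList
            ++ PySem.Int.toChars i ++ "\n".toList
      else
        res ++ "GND ".toList ++ "lutmem".toList ++ PySem.Int.toChars x ++ "_".toList
            ++ PySem.Int.toChars i ++ "\n".toList) []
    String.ofList result

-- ===== PORT B =====
def Get_mems_MUX_method_LUT3_alt (data : String) (x : Int) : String :=
  match PySem.Int.ofStrBase? data 16 with
  | none => ""  -- int(data, 16) raises ValueError: excluded by Pre_
  | some v0 =>
    let n : Nat := max 8 (PySem.Int.bitLength v0)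
    -- tags = []; for _ in range(n): tags.append('VCC ' if v & 1 else 'GND '); v >>= 1
    let st := (List.range n).foldl (fun (st : List (List Char) × Int) _ =>
      (st.1 ++ [if PySem.Int.band st.2 1 ≠ 0 then "VCC ".toList else "GND ".toList],
       st.2 >>> 1)) ([], v0)
    -- ''.join(tag + 'lutmem' + str(x) + '_' + str(i) + '\n' for i, tag in enumerate(reversed(tags)))
    String.ofList (((PySem.List.enumerate st.1.reverse 0).map (fun p =>
      p.2 ++ "lutmem".toList ++ PySem.Int.toChars x ++ "_".toList
        ++ PySem.Int.toChars p.1 ++ "\n".toList)).flatten)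

-- ===== PRECONDITION & SPEC =====
-- Pre_ excludes exactly the strings int(data, 16) rejects (ValueError in A).
def Pre_Get_mems_MUX_method_LUT3 (data : String) (x : Int) : Prop :=
  (PySem.Int.ofStrBase? data 16).isSome = true
instance (data : String) (x : Int) : Decidable (Pre_Get_mems_MUX_method_LUT3 data x) := by
  unfold Pre_Get_mems_MUX_method_LUT3; infer_instance

def pvWitness_Get_mems_MUX_method_LUT3 : String × Int := ("1f", 2)

-- On hex strings denoting a NEGATIVE number A drops the sign and formats the 'b' of bin()'s '-0b'
-- prefix as a GND line (an artefact of slicing bin()); B returns the max(8,bit_length)-bit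
-- two's-complement VCC/GND lines, the intended per-bit reading of the value.
def D_Get_mems_MUX_method_LUT3 (data : String) (x : Int) : Prop :=
  (PySem.Int.ofStrBase? data 16).getD 0 < 0
instance (data : String) (x : Int) : Decidable (D_Get_mems_MUX_method_LUT3 data x) := by
  unfold D_Get_mems_MUX_method_LUT3; infer_instance

def Spec_Get_mems_MUX_method_LUT3 (data : String) (x : Int) (out : String) : Prop :=
  ¬ D_Get_mems_MUX_method_LUT3 data x → out = Get_mems_MUX_method_LUT3_alt data x
instance (data : String) (x : Int) (out : String) : Decidable (Spec_Get_mems_MUX_method_LUT3 data x out) := by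
  unfold Spec_Get_mems_MUX_method_LUT3; infer_instance

def pvDiffWitness_Get_mems_MUX_method_LUT3 : String × Int := ("-5", 0)
def pvDiffWitnessOut_Get_mems_MUX_method_LUT3 : String × String :=
  ("GND lutmem0_0\nGND lutmem0_1\nGND lutmem0_2\nGND lutmem0_3\nGND lutmem0_4\nVCC lutmem0_5\nGND lutmem0_6\nVCC lutmem0_7\n",
   "VCC lutmem0_0\nVCC lutmem0_1\nVCC lutmem0_2\nVCC lutmem0_3\nVCC lutmem0_4\nGND lutmem0_5\nVCC lutmem0_6\nVCC lutmem0_7\n")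

-- ===== CLAIM (what is proved, stated in full; the proofs are below) =====
def Claim_unchanged_Get_mems_MUX_method_LUT3 : Prop := ∀ (data : String) (x : Int), Dom_Get_mems_MUX_method_LUT3 data x → Pre_Get_mems_MUX_method_LUT3 data x → Spec_Get_mems_MUX_method_LUT3 data x (Get_mems_MUX_method_LUT3 data x)
def Claim_changed_Get_mems_MUX_method_LUT3 : Prop := Dom_Get_mems_MUX_method_LUT3 (pvDiffWitness_Get_mems_MUX_method_LUT3.1) (pvDiffWitness_Get_mems_MUX_method_LUT3.2) ∧ Pre_Get_mems_MUX_method_LUT3 (pvDiffWitness_Get_mems_MUX_method_LUT3.1) (pvDiffWitness_Get_mems_MUX_method_LUT3.2) ∧ D_Get_mems_MUX_method_LUT3 (pvDiffWitness_Get_mems_MUX_method_LUT3.1) (pvDiffWitness_Get_mems_MUX_method_LUT3.2) ∧ Get_mems_MUX_method_LUT3 (pvDiffWitness_Get_mems_MUX_method_LUT3.1) (pvDiffWitness_Get_mems_MUX_method_LUT3.2) = pvDiffWitnessOut_Get_mems_MUX_method_LUT3.1 ∧ Get_mems_MUX_method_LUT3_alt (pvDiffWitness_Get_mems_MUX_method_LUT3.1)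 (pvDiffWitness_Get_mems_MUX_method_LUT3.2) = pvDiffWitnessOut_Get_mems_MUX_method_LUT3.2 ∧ pvDiffWitnessOut_Get_mems_MUX_method_LUT3.1 ≠ pvDiffWitnessOut_Get_mems_MUX_method_LUT3.2
def Claim_exact_Get_mems_MUX_method_LUT3 : Prop := ∀ (data : String) (x : Int), Dom_Get_mems_MUX_method_LUT3 data x → Pre_Get_mems_MUX_method_LUT3 data x → D_Get_mems_MUX_method_LUT3 data x → Get_mems_MUX_method_LUT3 data x ≠ Get_mems_MUX_method_LUT3_alt data x

-- ===== LEMMAS AND PROOFS =====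

lemma padLoop_eq : ∀ (k : Nat) (cs : List Char), 8 - cs.length ≤ k →
    padLoop k cs = List.replicate (8 - cs.length) '0' ++ cs := by
  intro k
  induction k with
  | zero =>
    intro cs h
    rw [padLoop]
    rw [show 8 - cs.length = 0 from by omega]
    simp
  | succ k ih =>
    intro cs h
    rw [padLoop]
    by_cases hl : cs.length < 8
    · rw [if_pos hl, ih ('0' :: cs) (by simp; omega)]
      rw [show 8 - cs.length = (8 - ('0' :: cs).length) + 1 from by simp; omega]
      simp [List.replicate_succ', List.append_assoc]
    · rw [if_neg hl, show 8 - cs.length = 0 from by omega]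
      simp

lemma padA_eq (cs : List Char) : padA cs = List.replicate (8 - cs.length) '0' ++ cs :=
  padLoop_eq 8 cs (by omega)

lemma tdc_acc : ∀ (fuel n : Nat) (ds : List Char),
    Nat.toDigitsCore 2 fuel n ds = Nat.toDigitsCore 2 fuel n [] ++ ds := by
  intro fuel
  induction fuel with
  | zero => intro n ds; simp [Nat.toDigitsCore]
  | succ f ih =>
    intro n ds
    simp only [Nat.toDigitsCore]
    by_cases h : n / 2 = 0
    · simp [h]
    · simp only [h, if_false]
      rw [ih (n / 2) ((n % 2).digitChar :: ds), ih (n / 2) [(n % 2).digitChar]]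
      simp

lemma tdc_fuel : ∀ (f1 f2 n : Nat) (ds : List Char), n < f1 → n < f2 →
    Nat.toDigitsCore 2 f1 n ds = Nat.toDigitsCore 2 f2 n ds := by
  intro f1
  induction f1 with
  | zero => intro f2 n ds h1 _; omega
  | succ g1 ih =>
    intro f2 n ds h1 h2
    cases f2 with
    | zero => omega
    | succ g2 =>
      simp only [Nat.toDigitsCore]
      by_cases h : n / 2 = 0
      · simp [h]
      · simp only [h, if_false]
        exact ih g2 (n / 2) _ (by omega) (by omega)

lemma toDigits_split (m : Nat) (h : 2 ≤ m) :
    Nat.toDigits 2 m = Nat.toDigits 2 (m / 2) ++ [Nat.digitChar (m % 2)] := by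
  unfold Nat.toDigits
  have h2 : m / 2 ≠ 0 := by omega
  rw [show Nat.toDigitsCore 2 (m + 1) m [] =
      Nat.toDigitsCore 2 m (m / 2) [(m % 2).digitChar] from by
    simp only [Nat.toDigitsCore]; rw [if_neg h2]]
  rw [tdc_acc m (m / 2) [(m % 2).digitChar]]
  rw [tdc_fuel m (m / 2 + 1) (m / 2) [] (by omega) (by omega)]

lemma len_toDigits : ∀ (m : Nat), 1 ≤ m →
    (Nat.toDigits 2 m).length = PySem.Int.bitLength (m : Int) := by
  intro m
  induction m using Nat.strong_induction_on with
  | _ m ih =>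
    intro h1
    by_cases h2 : m = 1
    · subst h2; decide
    · have hm2 : 2 ≤ m := by omega
      rw [toDigits_split m hm2, List.length_append]
      rw [ih (m / 2) (by omega) (by omega)]
      rw [PySem.Int.bitLength_natCast (show 0 < m by omega)]
      simp

def pvBitsN (m k : Nat) : List Char :=
  (List.range k).map (fun i => if m / 2 ^ (k - 1 - i) % 2 = 1 then '1' else '0')

lemma pvBitsN_succ (m k : Nat) :
    pvBitsN m (k + 1) = pvBitsN (m / 2) k ++ [if m % 2 = 1 then '1' else '0'] := by
  unfold pvBitsN
  rw [List.range_succ, List.map_append]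
  congr 1
  · apply List.map_congr_left
    intro i hi
    rw [List.mem_range] at hi
    have he : k + 1 - 1 - i = (k - 1 - i) + 1 := by omega
    rw [he, pow_succ, mul_comm, ← Nat.div_div_eq_div_mul]
  · simp

lemma pvBitsN_zero_val (k : Nat) : pvBitsN 0 k = List.replicate k '0' := by
  unfold pvBitsN
  simp

lemma pvBitsN_spec : ∀ (k m : Nat), 1 ≤ m → m < 2 ^ k →
    pvBitsN m k = List.replicate (k - (Nat.toDigits 2 m).length) '0' ++ Nat.toDigits 2 m := by
  intro k
  induction k with
  | zero => intro m h1 h2; omega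
  | succ k ih =>
    intro m h1 h2
    by_cases hm1 : m = 1
    · subst hm1
      rw [pvBitsN_succ]
      norm_num [pvBitsN_zero_val]
      rw [show Nat.toDigits 2 1 = ['1'] from by decide]
      simp
    · have hm2 : 2 ≤ m := by omega
      rw [pvBitsN_succ]
      rw [ih (m / 2) (by omega) (by rw [pow_succ] at h2; omega)]
      rw [toDigits_split m hm2, List.length_append]
      have hc : (if m % 2 = 1 then '1' else '0') = Nat.digitChar (m % 2) := by
        rcases Nat.mod_two_eq_zero_or_one m with h | h <;> rw [h] <;> decide
      rw [hc]
      simp only [List.length_singleton]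
      rw [show k + 1 - ((Nat.toDigits 2 (m / 2)).length + 1) = k - (Nat.toDigits 2 (m / 2)).length from by omega]
      simp [List.append_assoc]

lemma bind_eq (m : Nat) :
    padA (List.drop 2 (PySem.Int.toBinChars0b (m : Int))) =
      pvBitsN m (max 8 (PySem.Int.bitLength (m : Int))) := by
  rw [show PySem.Int.toBinChars0b (m : Int) = '0' :: 'b' :: Nat.toDigits 2 m from by
    unfold PySem.Int.toBinChars0b
    rw [if_neg (by omega)]
    simp]
  simp only [List.drop]
  rw [padA_eq]
  by_cases h0 : m = 0
  · subst h0; decide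
  · have h1 : 1 ≤ m := by omega
    have hlen : (Nat.toDigits 2 m).length = PySem.Int.bitLength (m : Int) := len_toDigits m h1
    have hlt : m < 2 ^ max 8 (PySem.Int.bitLength (m : Int)) := by
      have h3 := PySem.Int.lt_two_pow_bitLength (m : Int)
      have h4 : ((m : Int)).natAbs = m := by simp
      rw [h4] at h3
      calc m < 2 ^ PySem.Int.bitLength (m : Int) := h3
        _ ≤ 2 ^ max 8 (PySem.Int.bitLength (m : Int)) :=
          Nat.pow_le_pow_right (by omega) (Nat.le_max_right _ _)
    rw [pvBitsN_spec _ m h1 hlt, hlen]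
    have hcnt : 8 - PySem.Int.bitLength (m : Int) =
        max 8 (PySem.Int.bitLength (m : Int)) - PySem.Int.bitLength (m : Int) := by
      rcases Nat.le_total (PySem.Int.bitLength (m : Int)) 8 with h | h
      · rw [Nat.max_eq_left h]
      · rw [Nat.max_eq_right h]
        omega
    rw [← hcnt]

lemma bind_neg_eq (v : Int) (hv : v < 0) :
    padA (List.drop 2 (PySem.Int.toBinChars0b v)) =
      List.replicate (8 - ('b' :: Nat.toDigits 2 v.natAbs).length) '0'
        ++ 'b' :: Nat.toDigits 2 v.natAbs := by
  rw [show PySem.Int.toBinChars0b v = '-' :: '0' :: 'b' :: Nat.toDigits 2 v.natAbs from by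
    unfold PySem.Int.toBinChars0b; rw [if_pos hv]]
  simp only [List.drop]
  exact padA_eq _

lemma foldl_if_append {α : Type} (l : List α) (p : α → Prop) [DecidablePred p]
    (f g : α → List Char) (acc : List Char) :
    l.foldl (fun res i => if p i then res ++ f i else res ++ g i) acc =
      acc ++ l.flatMap (fun i => if p i then f i else g i) := by
  rw [show (fun (res : List Char) i => if p i then res ++ f i else res ++ g i) =
      (fun res i => res ++ if p i then f i else g i) from
    funext fun res => funext fun i => by split <;> rfl]
  exact PySem.List.foldl_append_eq_flatMap _ l acc

lemma bit_cond (m s : Nat) :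
    (PySem.Int.band (((m : Nat) : Int) >>> ((s : Nat) : Int)) 1 ≠ 0) ↔ (m / 2 ^ s % 2 = 1) := by
  have hc : (((m : Nat) : Int) >>> ((s : Nat) : Int)) = (((m >>> s : Nat) : Nat) : Int) := by
    exact_mod_cast Int.shiftRight_natCast m s
  rw [hc, show ((1 : Int)) = ((1 : Nat) : Int) from rfl, PySem.Int.band_natCast]
  rw [Nat.and_one_is_mod, Nat.shiftRight_eq_div_pow]
  have h2 := Nat.mod_two_eq_zero_or_one (m / 2 ^ s)
  constructor
  · intro h
    rcases h2 with h0 | h1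
    · exact absurd (by rw [h0]; rfl) h
    · exact h1
  · intro h hc
    rw [h] at hc
    simp at hc

-- the tag of one bit, as B computes it
def pvTag (w : Int) : List Char :=
  if PySem.Int.band w 1 ≠ 0 then "VCC ".toList else "GND ".toList

-- B's tag-collecting loop: state after k iterations = all low-k tags (LSB-first) and v shifted by k
lemma tagsLoop_eq : ∀ (k : Nat) (acc : List (List Char)) (w : Int),
    (List.range k).foldl (fun (st : List (List Char) × Int) _ =>
        (st.1 ++ [if PySem.Int.band st.2 1 ≠ 0 then "VCC ".toList else "GND ".toList],
         st.2 >>> 1)) (acc, w)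
      = (acc ++ (List.range k).map (fun j => pvTag (w >>> ((j : Nat) : Int))),
         w >>> ((k : Nat) : Int)) := by
  intro k
  induction k with
  | zero =>
    intro acc w
    simp only [List.range_zero, List.foldl_nil, List.map_nil, List.append_nil]
    refine Prod.ext rfl ?_
    show w = w >>> (0 : Int)
    cases w with
    | ofNat m =>
      rw [show (Int.ofNat m) = ((m : Nat) : Int) from rfl,
        show (0 : Int) = ((0 : Nat) : Int) from rfl, Int.shiftRight_natCast]
      rfl
    | negSucc m =>
      rw [show (0 : Int) = ((0 : Nat) : Int) from rfl, Int.shiftRight_negSucc,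
        Nat.shiftRight_zero]
  | succ k ih =>
    intro acc w
    rw [List.range_succ, List.foldl_append, ih]
    simp only [List.foldl_cons, List.foldl_nil, List.map_append, List.map_cons, List.map_nil]
    refine Prod.ext ?_ ?_
    · rw [List.append_assoc]; rfl
    · show (w >>> ((k : Nat) : Int)) >>> (1 : Int) = w >>> (((k + 1 : Nat)) : Int)
      rw [show (((k + 1 : Nat)) : Int) = ((k : Nat) : Int) + ((1 : Nat) : Int) from by push_cast; ring]
      rw [Int.shiftRight_add']
      norm_cast

lemma rev_map_range {α : Type} (k : Nat) (f : Nat → α) :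
    ((List.range k).map f).reverse = (List.range k).map (fun i => f (k - 1 - i)) := by
  apply List.ext_getElem
  · simp
  · intro i h1 h2
    simp only [List.length_reverse, List.length_map, List.length_range] at h1
    rw [List.getElem_reverse]
    simp only [List.getElem_map, List.getElem_range, List.length_map, List.length_range]

-- B's value, rewritten as the MSB-first per-bit map it produces
lemma alt_eq (data : String) (x : Int) :
    Get_mems_MUX_method_LUT3_alt data x =
      match PySem.Int.ofStrBase? data 16 with
      | none => ""
      | some v =>
        String.ofList (((List.range (max 8 (PySem.Int.bitLength v))).map (fun i =>
          (if PySem.Int.band (v >>> (((max 8 (PySem.Int.bitLength v) - 1 - i : Nat)) : Int)) 1 ≠ 0 then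
            "VCC ".toList else "GND ".toList)
          ++ "lutmem".toList ++ PySem.Int.toChars x ++ "_".toList
          ++ PySem.Int.toChars (i : Int) ++ "\n".toList)).flatten) := by
  unfold Get_mems_MUX_method_LUT3_alt
  cases hv : PySem.Int.ofStrBase? data 16 with
  | none => rfl
  | some v =>
    simp only []
    set n := max 8 (PySem.Int.bitLength v) with hn
    rw [tagsLoop_eq]
    simp only [List.nil_append]
    rw [rev_map_range]
    rw [PySem.List.enumerate_eq_map_pyRange (d := ("GND ".toList : List Char))]
    have hlen2 : PySem.List.len ((List.range n).map (fun i => pvTag (v >>> ((n - 1 - i : Nat) : Int)))) = ((n : Nat) : Int) := by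
      simp [PySem.List.len]
    rw [hlen2]
    rw [PySem.List.pyRange_zero_natCast n, List.map_map, List.map_map]
    apply congrArg String.ofList
    apply congrArg List.flatten
    apply List.map_congr_left
    intro j hj
    rw [List.mem_range] at hj
    simp only [Function.comp]
    rw [PySem.List.pyGetD_natCast]
    rw [List.getD_eq_getElem _ _ (by simpa using hj)]
    simp [pvTag]

-- ===== VERDICT (by name: the statement is the Claim_ definition above) =====
theorem Get_mems_MUX_method_LUT3_spec : Claim_unchanged_Get_mems_MUX_method_LUT3 := by
  intro data x hdom hpre hnd
  unfold Pre_Get_mems_MUX_method_LUT3 at hpre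
  unfold D_Get_mems_MUX_method_LUT3 at hnd
  rw [alt_eq]
  unfold Get_mems_MUX_method_LUT3
  cases hv : PySem.Int.ofStrBase? data 16 with
  | none => rw [hv] at hpre
  | some v =>
    rw [hv] at hnd
    simp only [Option.getD_some, not_lt] at hnd
    obtain ⟨m, rfl⟩ : ∃ m : Nat, v = (m : Int) := ⟨v.toNat, by omega⟩
    simp only []
    rw [bind_eq m]
    set n := max 8 (PySem.Int.bitLength (m : Int)) with hn
    have hlen : (pvBitsN m n).length = n := by simp [pvBitsN]
    rw [hlen, PySem.List.pyRange_zero_natCast n, List.foldl_map]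
    simp only [List.append_assoc]
    rw [foldl_if_append (List.range n)
      (fun k => PySem.List.pyGetD (pvBitsN m n) ((k : Nat) : Int) ' ' = '1')]
    rw [List.nil_append, ← List.flatMap_def]
    apply congrArg String.ofList
    rw [List.flatMap_def, List.flatMap_def]
    apply congrArg List.flatten
    apply List.map_congr_left
    intro j hj
    rw [List.mem_range] at hj
    have hget : PySem.List.pyGetD (pvBitsN m n) ((j : Nat) : Int) ' ' =
        (if m / 2 ^ (n - 1 - j) % 2 = 1 then '1' else '0') := by
      rw [PySem.List.pyGetD_natCast]
      rw [List.getD_eq_getElem _ _ (by simpa [pvBitsN] using hj)]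
      simp [pvBitsN]
    rw [hget]
    have hcond : (PySem.Int.band ((m : Int) >>> (((n - 1 - j : Nat)) : Int)) 1 ≠ 0) ↔
        (m / 2 ^ (n - 1 - j) % 2 = 1) := bit_cond m (n - 1 - j)
    by_cases hb : m / 2 ^ (n - 1 - j) % 2 = 1
    · rw [if_pos (by rw [hb]; rfl), if_pos (hcond.mpr hb)]
    · rw [if_neg (by rw [if_neg hb]; decide), if_neg (fun hc => hb (hcond.mp hc))]

theorem Get_mems_MUX_method_LUT3_changed : Claim_changed_Get_mems_MUX_method_LUT3 := by
  unfold Claim_changed_Get_mems_MUX_method_LUT3; decide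

theorem Get_mems_MUX_method_LUT3_tight : Claim_exact_Get_mems_MUX_method_LUT3 := by
  intro data x hdom hpre hD heq
  unfold D_Get_mems_MUX_method_LUT3 at hD
  rw [alt_eq] at heq
  unfold Get_mems_MUX_method_LUT3 at heq
  cases hv : PySem.Int.ofStrBase? data 16 with
  | none => rw [hv] at hD; simp at hD
  | some v =>
    rw [hv] at hD heq
    simp only [Option.getD_some] at hD
    simp only [] at heq
    rw [bind_neg_eq v hD] at heq
    set ds := Nat.toDigits 2 v.natAbs with hds
    set dl := ds.length with hdl
    set bind := List.replicate (8 - ('b' :: ds).length) '0' ++ 'b' :: ds with hbind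
    have hna : 1 ≤ v.natAbs := by omega
    have hLd : dl = PySem.Int.bitLength ((v.natAbs : Nat) : Int) := len_toDigits _ hna
    have hLv : PySem.Int.bitLength v = PySem.Int.bitLength ((v.natAbs : Nat) : Int) := by
      conv_lhs => rw [show v = -((v.natAbs : Nat) : Int) from by omega]
      rw [PySem.Int.bitLength_neg]
    rw [PySem.List.pyRange_zero_natCast, List.foldl_map] at heq
    simp only [List.append_assoc] at heq
    rw [foldl_if_append (List.range bind.length)
      (fun k => PySem.List.pyGetD bind ((k : Nat) : Int) ' ' = '1'),
      List.nil_append, ← List.flatMap_def, String.ofList_inj] at heq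
    rcases Nat.lt_or_ge dl 8 with hsm | hbg
    · -- dl ≤ 7 : both strings have 8 lines; the first line differs (GND in A, VCC in B)
      have hblen : bind.length = 8 := by simp [hbind]; omega
      have hn8 : max 8 (PySem.Int.bitLength v) = 8 := by
        rw [hLv, ← hLd]; exact Nat.max_eq_left (by omega)
      rw [hblen, hn8] at heq
      rw [show (8 : Nat) = 7 + 1 from rfl, List.range_succ_eq_map] at heq
      rw [List.flatMap_cons, List.flatMap_cons] at heq
      have hc0 : ¬ (PySem.List.pyGetD bind ((0 : Nat) : Int) ' ' = '1') := by
        rw [PySem.List.pyGetD_natCast, hbind]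
        rcases Nat.lt_or_ge dl 7 with h7 | h7
        · rw [show 8 - ('b' :: ds).length = (6 - dl) + 1 from by simp [← hdl]; omega,
            List.replicate_succ]
          simp
        · rw [show 8 - ('b' :: ds).length = 0 from by simp [← hdl]; omega]
          simp
      rw [if_neg hc0] at heq
      have habs : v.natAbs < 128 := by
        have h3 := PySem.Int.lt_two_pow_bitLength ((v.natAbs : Nat) : Int)
        have h4 : (((v.natAbs : Nat) : Int)).natAbs = v.natAbs := Int.natAbs_natCast _
        rw [h4, ← hLd] at h3
        calc v.natAbs < 2 ^ dl := h3
          _ ≤ 2 ^ 7 := Nat.pow_le_pow_right (by omega) (by omega)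
      have hshift : v >>> (((7 + 1 - 1 - 0 : Nat)) : Int) = -1 := by
        obtain ⟨k, rfl⟩ : ∃ k, v = Int.negSucc k :=
          ⟨(v.natAbs - 1), by rw [Int.negSucc_eq]; omega⟩
        have hk : k >>> 7 = 0 := by
          rw [Nat.shiftRight_eq_div_pow]
          apply Nat.div_eq_of_lt
          simp [Int.natAbs_negSucc] at habs
          omega
        calc Int.negSucc k >>> (((7 + 1 - 1 - 0 : Nat)) : Int) = Int.negSucc (k >>> 7) :=
              Int.shiftRight_negSucc k 7
          _ = -1 := by rw [hk]; decide
      simp only [hshift, show PySem.Int.band (-1 : Int) 1 = 1 from by decide] at heq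
      rw [if_pos (show (1 : Int) ≠ 0 from by decide)] at heq
      rw [show ("GND ".toList : List Char) = ['G', 'N', 'D', ' '] from rfl,
        show ("VCC ".toList : List Char) = ['V', 'C', 'C', ' '] from rfl] at heq
      simp at heq
    · -- dl ≥ 8 : A emits dl + 1 lines, B emits dl lines; the total lengths differ
      have hblen : bind.length = dl + 1 := by simp [hbind]; omega
      have hnd : max 8 (PySem.Int.bitLength v) = dl := by
        rw [hLv, ← hLd]; exact Nat.max_eq_right (by omega)
      rw [hblen, hnd] at heq
      have hlen := congrArg List.length heq
      rw [List.length_flatMap, List.length_flatMap] at hlen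
      rw [List.range_succ, List.map_append, List.sum_append] at hlen
      simp only [apply_ite List.length, List.length_append, ite_self,
        show ("VCC ".toList : List Char).length = 4 from rfl,
        show ("GND ".toList : List Char).length = 4 from rfl] at hlen
      simp only [List.map_cons, List.map_nil, List.sum_cons, List.sum_nil] at hlen
      omega
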